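-- pv_equiv track=rewrite | github.com/acrosshorizon/CIS41A | takeHomeF.py | buildBell
-- ===== SOURCE A (Python) =====
-- def buildBell(row):
-- 	count = 0
-- 	pList = []
-- 	for r in range(row):
-- 		sublist = []
-- 		if r == 0:
-- 			sublist.append(1)
-- 			pList.append(sublist)
-- 			count += 1
-- 		else:
-- 			for c in range(count + 1):
-- 				if c == 0:
-- 					sublist.append(pList[count - 1][-1])
-- 				else:
-- 					sublist.append(pList[count - 1][c - 1] + sublist[c - 1])
-- 			pList.append(sublist)
-- 			count += 1
-- 	return pList
-- ===== SOURCE B (Python) =====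
-- def buildBell(row):
--     if row <= 0:
--         return []
--     # Pascal's triangle of binomial coefficients C[n][k] = n choose k, n < row
--     C = [[1]]
--     for n in range(1, row):
--         p = C[-1]
--         C.append([1] + [p[i - 1] + p[i] for i in range(1, n)] + [1])
--     # Bell numbers B[0..row-1] via B[n+1] = sum C(n,k)*B[k]
--     B = [1]
--     for n in range(row - 1):
--         B.append(sum(C[n][k] * B[k] for k in range(n + 1)))
--     # closed form for the triangle entry: a(r,k) = sum_j C(k,j) * B[r-j]
--     return [[sum(C[k][j] * B[r - j] for j in range(k + 1)) for k in range(r + 1)]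
--             for r in range(row)]
-- ===== Notes on version B (the rewrite author's own statement) =====
-- stated objective: alternative
-- what changed: Instead of deriving each row from the previous one by A's first-element/cumulative-sum recurrence, B precomputes Pascal's triangle and the Bell numbers and fills every entry independently by the closed form a(r,k) = sum_j C(k,j)*Bell(r-j).
import Mathlib
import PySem

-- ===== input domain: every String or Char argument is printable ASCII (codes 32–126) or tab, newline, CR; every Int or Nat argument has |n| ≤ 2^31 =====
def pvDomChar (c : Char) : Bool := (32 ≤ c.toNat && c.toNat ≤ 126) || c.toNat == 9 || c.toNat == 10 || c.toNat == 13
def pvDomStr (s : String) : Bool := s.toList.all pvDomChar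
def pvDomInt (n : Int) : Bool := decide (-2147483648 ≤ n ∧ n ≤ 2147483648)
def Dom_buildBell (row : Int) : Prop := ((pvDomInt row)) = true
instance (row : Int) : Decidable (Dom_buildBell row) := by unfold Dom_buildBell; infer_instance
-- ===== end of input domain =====

-- B replaces A's row-to-row recurrence by closed-form entries: it builds Pascal's triangle
-- of binomials and the Bell numbers, then computes each entry as a binomial-weighted sum of
-- Bell numbers (objective: alternative algorithm; not faster).


-- ===== PORT A =====
-- loop body of A's 'for r in range(row)' (state: (count, pList))
def bellStepA (st : Int × List (List Int)) (r : Int) : Int × List (List Int) :=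
  let count := st.1
  let pList := st.2
  if r == 0 then
    (count + 1, pList ++ [[1]])
  else
    let sublist := (PySem.List.pyRange 0 (count + 1) 1).foldl
      (fun (sub : List Int) (c : Int) =>
        if c == 0 then
          sub ++ [PySem.List.pyGetD (PySem.List.pyGetD pList (count - 1) []) (-1) 0]
        else
          sub ++ [PySem.List.pyGetD (PySem.List.pyGetD pList (count - 1) []) (c - 1) 0
                  + PySem.List.pyGetD sub (c - 1) 0]) []
    (count + 1, pList ++ [sublist])

def buildBell (row : Int) : List (List Int) :=
  ((PySem.List.pyRange 0 row 1).foldl bellStepA (0, [])).2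

-- ===== PORT B =====
-- Pascal loop body: C.append([1] + [p[i-1] + p[i] for i in range(1, n)] + [1])
def pascStep (C : List (List Int)) (n : Int) : List (List Int) :=
  let p := PySem.List.pyGetD C (-1) []
  C ++ [[1] ++ (PySem.List.pyRange 1 n 1).map
          (fun i => PySem.List.pyGetD p (i - 1) 0 + PySem.List.pyGetD p i 0) ++ [1]]

-- Bell-number loop body: B.append(sum(C[n][k] * B[k] for k in range(n + 1)))
def bellNumStep (C : List (List Int)) (B : List Int) (n : Int) : List Int :=
  B ++ [((PySem.List.pyRange 0 (n + 1) 1).map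
          (fun k => PySem.List.pyGetD (PySem.List.pyGetD C n []) k 0
                    * PySem.List.pyGetD B k 0)).sum]

def buildBell_alt (row : Int) : List (List Int) :=
  if row ≤ 0 then [] else
  let C := (PySem.List.pyRange 1 row 1).foldl pascStep [[1]]
  let B := (PySem.List.pyRange 0 (row - 1) 1).foldl (bellNumStep C) [1]
  (PySem.List.pyRange 0 row 1).map (fun r =>
    (PySem.List.pyRange 0 (r + 1) 1).map (fun k =>
      ((PySem.List.pyRange 0 (k + 1) 1).map
        (fun j => PySem.List.pyGetD (PySem.List.pyGetD C k []) j 0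
                  * PySem.List.pyGetD B (r - j) 0)).sum))

-- ===== PRECONDITION & SPEC =====
def Spec_buildBell (row : Int) (out : List (List Int)) : Prop := out = buildBell_alt row
instance (row : Int) (out : List (List Int)) : Decidable (Spec_buildBell row out) := by unfold Spec_buildBell; infer_instance

-- ===== CLAIM (what is proved, stated in full; the proofs are below) =====
def Claim_equal_buildBell : Prop := ∀ (row : Int), Dom_buildBell row → Spec_buildBell row (buildBell row)

-- ===== LEMMAS AND PROOFS =====

-- Aitken (Bell) triangle entry, proof-level reference
def aT : Nat → Nat → Int
  | 0, 0 => 1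
  | n + 1, 0 => aT n n
  | 0, _ + 1 => 0      -- outside the triangle, unused
  | n + 1, k + 1 => aT (n + 1) k + aT n k
termination_by n k => (n, k)

-- Python's Bell numbers: bN n = aT n 0
def bN (n : Nat) : Int := aT n 0

-- row n of the triangle
def rowM (n : Nat) : List Int := (List.range (n + 1)).map (aT n)

-- Pascal row n
def pasc (n : Nat) : List Int := (List.range (n + 1)).map (fun i => ((n.choose i : Nat) : Int))

-- prefix sums of a list starting from accumulator s (characterizes A's inner loop)
def psums (s : Int) : List Int → List Int
  | [] => []
  | x :: xs => (s + x) :: psums (s + x) xs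

theorem lastD_cons (a d : Int) (l : List Int) :
    ((a :: l).getLast?).getD d = (l.getLast?).getD a := by
  cases l with
  | nil => simp
  | cons h t =>
    cases h' : (h :: t).getLast? with
    | some z => rw [List.getLast?_cons_cons, h']; rfl
    | none => exact absurd h' (by simp)

theorem psums_append (s : Int) (q r : List Int) :
    psums s (q ++ r) = psums s q ++ psums ((psums s q).getLastD s) r := by
  induction q generalizing s with
  | nil => simp [psums]
  | cons x xs ih => simp [psums, ih (s + x), lastD_cons]

theorem length_psums (s : Int) (q : List Int) : (psums s q).length = q.length := by
  induction q generalizing s with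
  | nil => rfl
  | cons x xs ih => simp [psums, ih]

-- element at index (length) of (s0 :: t) is the last element
theorem getElem_cons_lastD (s0 : Int) (t : List Int) (k : Nat) (hk : t.length = k) :
    (s0 :: t)[k]'(by simp [hk]) = t.getLastD s0 := by
  subst hk
  induction t generalizing s0 with
  | nil => simp
  | cons y ys ih => simpa [lastD_cons] using ih y

-- A's inner fold over range(m+1) builds the prefix sums over the first m elements of prev
theorem foldA_inner (pList : List (List Int)) (count : Int) (prev : List Int)
    (hp : PySem.List.pyGetD pList (count - 1) [] = prev)
    (m : Nat) (hm : m ≤ prev.length) :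
    (PySem.List.pyRange 0 ((m : Int) + 1) 1).foldl
      (fun (sub : List Int) (c : Int) =>
        if c == 0 then
          sub ++ [PySem.List.pyGetD (PySem.List.pyGetD pList (count - 1) []) (-1) 0]
        else
          sub ++ [PySem.List.pyGetD (PySem.List.pyGetD pList (count - 1) []) (c - 1) 0
                  + PySem.List.pyGetD sub (c - 1) 0]) []
      = PySem.List.pyGetD prev (-1) 0 ::
          psums (PySem.List.pyGetD prev (-1) 0) (prev.take m) := by
  set s0 := PySem.List.pyGetD prev (-1) 0 with hs0
  induction m with
  | zero =>
    have h01 : PySem.List.pyRange 0 (((0 : Nat) : Int) + 1) 1 = [0] := by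
      simp only [Nat.cast_zero]
      decide
    rw [h01]
    simp [hp, psums, ← hs0]
  | succ k ih =>
    have hk : k ≤ prev.length := Nat.le_of_succ_le hm
    have hcast : ((k + 1 : Nat) : Int) + 1 = ((k : Int) + 1) + 1 := by push_cast; ring
    rw [hcast, PySem.List.pyRange_one_succ_right (by omega), List.foldl_append, ih hk]
    have hne : (((k : Int) + 1) == 0) = false := by simp; omega
    simp only [List.foldl_cons, List.foldl_nil, hne, Bool.false_eq_true, if_false]
    have hlen : (psums s0 (prev.take k)).length = k := by
      simp [length_psums, Nat.min_eq_left hk]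
    have hidx : PySem.List.pyGetD (s0 :: psums s0 (prev.take k)) ((k : Int) + 1 - 1) 0
        = (psums s0 (prev.take k)).getLastD s0 := by
      have h1 : (k : Int) + 1 - 1 = ((k : Nat) : Int) := by ring
      rw [h1, PySem.List.pyGetD_natCast]
      rw [List.getD_eq_getElem _ _ (by simp [hlen])]
      exact getElem_cons_lastD s0 _ k hlen
    have hpk : PySem.List.pyGetD prev ((k : Int) + 1 - 1) 0 = prev[k]'(by omega) := by
      have h1 : (k : Int) + 1 - 1 = ((k : Nat) : Int) := by ring
      rw [h1, PySem.List.pyGetD_natCast]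
      exact List.getD_eq_getElem _ _ (by omega)
    rw [hp, hidx, hpk]
    have htake : prev.take (k + 1) = prev.take k ++ [prev[k]'(by omega)] := by
      rw [List.take_add_one]
      simp [List.getElem?_eq_getElem (by omega : k < prev.length)]
    rw [htake, psums_append]
    simp [psums]
    ring

-- getLastD of a mapped range
theorem getLastD_map_range (g : Nat → Int) (j : Nat) (d : Int) :
    (((List.range j).map g).getLastD d) = if j = 0 then d else g (j - 1) := by
  cases j with
  | zero => simp
  | succ m => rw [List.range_succ]; simp

-- prefix sums over row n seeded with aT (n+1) 0 give row n+1's tail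
theorem psums_row (n : Nat) : ∀ j : Nat,
    psums (aT (n + 1) 0) ((List.range j).map (aT n))
      = (List.range j).map (fun k => aT (n + 1) (k + 1)) := by
  intro j
  induction j with
  | zero => simp [psums]
  | succ m ih =>
    rw [List.range_succ, List.map_append, List.map_append, psums_append, ih]
    have hl : (((List.range m).map (fun k => aT (n + 1) (k + 1))).getLastD (aT (n + 1) 0))
        = aT (n + 1) m := by
      rw [getLastD_map_range]
      cases m with
      | zero => simp
      | succ _ => simp
    rw [hl]
    simp [psums, aT]

theorem rowM_succ_decomp (n : Nat) :
    rowM (n + 1) = aT (n + 1) 0 :: psums (aT (n + 1) 0) (rowM n) := by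
  unfold rowM
  rw [psums_row n (n + 1)]
  rw [List.range_succ_eq_map]
  simp [List.map_map, Function.comp]

theorem length_rowM (n : Nat) : (rowM n).length = n + 1 := by simp [rowM]

theorem rowM_ne_nil (n : Nat) : rowM n ≠ [] := by
  intro h; have := length_rowM n; rw [h] at this; simp at this

theorem rowM_last (n : Nat) : PySem.List.pyGetD (rowM n) (-1) 0 = aT n n := by
  rw [PySem.List.pyGetD_neg_one (rowM n) 0 (rowM_ne_nil n), List.getLast_eq_getElem]
  simp [rowM]

-- getting row j out of the triangle prefix
theorem triangle_get (n j : Nat) (hj : j < n) :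
    PySem.List.pyGetD ((List.range n).map rowM) ((j : Nat) : Int) [] = rowM j := by
  rw [PySem.List.pyGetD_natCast]
  rw [List.getD_eq_getElem _ _ (by simpa using hj)]
  simp

-- A's main fold invariant: after n iterations the triangle is rows 0..n-1
theorem foldA_inv (n : Nat) :
    (PySem.List.pyRange 0 (n : Int) 1).foldl bellStepA (0, [])
      = ((n : Int), (List.range n).map rowM) := by
  induction n with
  | zero => simp [PySem.List.pyRange_one_eq_nil, List.range_zero]
  | succ n ih =>
    have hcast : (((n + 1 : Nat)) : Int) = ((n : Nat) : Int) + 1 := by push_cast; ring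
    rw [hcast, PySem.List.pyRange_one_succ_right (by omega), List.foldl_append, ih]
    simp only [List.foldl_cons, List.foldl_nil]
    rw [List.range_succ, List.map_append]
    cases n with
    | zero =>
      simp [bellStepA, rowM, aT]
    | succ m =>
      have hr0 : (((m + 1 : Nat) : Int) == 0) = false := by
        simp only [beq_eq_false_iff_ne, ne_eq]
        omega
      rw [bellStepA]
      simp only [hr0, Bool.false_eq_true, if_false]
      have hget : PySem.List.pyGetD ((List.range (m + 1)).map rowM) (((m + 1 : Nat) : Int) - 1) []
          = rowM m := by
        have h1 : ((m + 1 : Nat) : Int) - 1 = ((m : Nat) : Int) := by push_cast; ring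
        rw [h1]; exact triangle_get (m + 1) m (by omega)
      have hinner := foldA_inner ((List.range (m + 1)).map rowM) ((m + 1 : Nat) : Int)
        (rowM m) hget (m + 1) (by rw [length_rowM])
      rw [hinner, List.take_of_length_le (by rw [length_rowM])]
      rw [rowM_last m]
      have : aT m m = aT (m + 1) 0 := by simp only [aT]
      rw [this, ← rowM_succ_decomp m]
      simp

-- list sum over range = Finset sum over range
theorem list_sum_range (f : Nat → Int) (n : Nat) :
    (((List.range n).map f).sum) = ∑ j ∈ Finset.range n, f j := by
  induction n with
  | zero => simp
  | succ m ih => rw [List.range_succ, Finset.sum_range_succ]; simp [ih]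

-- ===== the key combinatorial identity =====
-- aT n k = Σ_{j ≤ k} C(k,j) * bN (n - j), for k ≤ n
theorem aT_eq_sum (n : Nat) : ∀ k : Nat, k ≤ n →
    aT n k = ∑ j ∈ Finset.range (k + 1), ((k.choose j : Nat) : Int) * bN (n - j) := by
  induction n with
  | zero =>
    intro k hk
    interval_cases k
    simp [bN, aT]
  | succ n ihn =>
    intro k hk
    induction k with
    | zero => simp [bN]
    | succ k ihk =>
      have hkn : k ≤ n := by omega
      have step : aT (n + 1) (k + 1) = aT (n + 1) k + aT n k := by
        rw [aT]
      rw [step, ihk (by omega), ihn k hkn]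
      -- rewrite RHS sum using Pascal's rule
      rw [Finset.sum_range_succ' (fun j => ((((k+1).choose j : Nat) : Int)) * bN (n + 1 - j))]
      have hps : ∀ j, (((k+1).choose (j+1) : Nat) : Int) = ((k.choose j : Nat) : Int) + ((k.choose (j+1) : Nat) : Int) := by
        intro j
        rw [Nat.choose_succ_succ]
        push_cast; ring
      have h1 : ∑ j ∈ Finset.range (k + 1),
          (((k+1).choose (j+1) : Nat) : Int) * bN (n + 1 - (j + 1))
          = (∑ j ∈ Finset.range (k + 1), ((k.choose j : Nat) : Int) * bN (n - j))
            + ∑ j ∈ Finset.range (k + 1), ((k.choose (j+1) : Nat) : Int) * bN (n - j) := by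
        rw [← Finset.sum_add_distrib]
        apply Finset.sum_congr rfl
        intro j hj
        rw [hps j]
        have : n + 1 - (j + 1) = n - j := by omega
        rw [this]; ring
      rw [h1]
      have h2 : (∑ j ∈ Finset.range (k + 1), ((k.choose (j+1) : Nat) : Int) * bN (n - j))
            + (((k+1).choose 0 : Nat) : Int) * bN (n + 1 - 0)
          = ∑ j ∈ Finset.range (k + 1 + 1), ((k.choose j : Nat) : Int) * bN (n + 1 - j) := by
        rw [Finset.sum_range_succ' (fun j => ((k.choose j : Nat) : Int) * bN (n + 1 - j))]
        congr 1
        · apply Finset.sum_congr rfl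
          intro j _
          have : n + 1 - (j + 1) = n - j := by omega
          rw [this]
        · simp
      have h3 : ∑ j ∈ Finset.range (k + 1 + 1), ((k.choose j : Nat) : Int) * bN (n + 1 - j)
          = ∑ j ∈ Finset.range (k + 1), ((k.choose j : Nat) : Int) * bN (n + 1 - j) := by
        rw [Finset.sum_range_succ]
        simp [Nat.choose_succ_self]
      linarith [h2, h3]

-- the Bell recurrence python B uses: bN (n+1) = Σ_{k ≤ n} C(n,k) * bN k
theorem bN_rec (n : Nat) :
    bN (n + 1) = ∑ k ∈ Finset.range (n + 1), ((n.choose k : Nat) : Int) * bN k := by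
  have h0 : bN (n + 1) = aT n n := by simp only [bN, aT]
  rw [h0, aT_eq_sum n n (le_refl n)]
  rw [← Finset.sum_range_reflect (fun j => ((n.choose j : Nat) : Int) * bN (n - j)) (n + 1)]
  apply Finset.sum_congr rfl
  intro j hj
  simp only [Finset.mem_range] at hj
  have hj' : j ≤ n := by omega
  have h1 : n + 1 - 1 - j = n - j := by omega
  rw [h1, Nat.choose_symm hj']
  congr 2
  omega

-- ===== B-side structure lemmas =====

theorem pasc_get (n j : Nat) (hj : j ≤ n) :
    PySem.List.pyGetD (pasc n) ((j : Nat) : Int) 0 = ((n.choose j : Nat) : Int) := by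
  unfold pasc
  rw [PySem.List.pyGetD_natCast, List.getD_eq_getElem _ _ (by simpa using by omega : j < ((List.range (n+1)).map _).length)]
  simp

-- Pascal row recurrence as the port's list expression
theorem pasc_step_eq (u : Nat) :
    [1] ++ (PySem.List.pyRange 1 ((u + 1 : Nat) : Int) 1).map
        (fun i => PySem.List.pyGetD (pasc u) (i - 1) 0 + PySem.List.pyGetD (pasc u) i 0) ++ [1]
      = pasc (u + 1) := by
  have hrange : PySem.List.pyRange 1 ((u + 1 : Nat) : Int) 1
      = (List.range u).map (fun k => ((k : Nat) : Int) + 1) := by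
    rw [PySem.List.pyRange_one]
    have : (((u + 1 : Nat) : Int) - 1).toNat = u := by omega
    rw [this]
    apply List.map_congr_left
    intro k hk
    omega
  rw [hrange, List.map_map]
  have hmap : ∀ k ∈ List.range u,
      ((fun i => PySem.List.pyGetD (pasc u) (i - 1) 0 + PySem.List.pyGetD (pasc u) i 0) ∘
        (fun k : Nat => ((k : Nat) : Int) + 1)) k
      = (((u + 1).choose (k + 1) : Nat) : Int) := by
    intro k hk
    simp only [List.mem_range] at hk
    simp only [Function.comp]
    have h1 : ((k : Nat) : Int) + 1 - 1 = ((k : Nat) : Int) := by ring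
    have h2 : ((k : Nat) : Int) + 1 = (((k + 1 : Nat)) : Int) := by push_cast; ring
    rw [h1, h2, pasc_get u k (by omega), pasc_get u (k + 1) (by omega)]
    rw [Nat.choose_succ_succ]
    push_cast; ring
  rw [List.map_congr_left hmap]
  unfold pasc
  rw [List.range_succ_eq_map]
  rw [List.range_succ]
  simp [List.map_map, Function.comp, Nat.choose_succ_succ]

-- C fold invariant
theorem foldC_inv (t : Nat) (ht : 1 ≤ t) :
    (PySem.List.pyRange 1 (t : Int) 1).foldl pascStep [[1]] = (List.range t).map pasc := by
  induction t with
  | zero => omega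
  | succ u ih =>
    cases Nat.eq_or_lt_of_le ht with
    | inl h =>
      have : u = 0 := by omega
      subst this
      have : PySem.List.pyRange 1 ((1 : Nat) : Int) 1 = [] := by
        apply PySem.List.pyRange_one_eq_nil; simp
      rw [this]
      simp [pasc]
    | inr h =>
      have hu : 1 ≤ u := by omega
      have hcast : (((u + 1 : Nat)) : Int) = ((u : Nat) : Int) + 1 := by push_cast; ring
      rw [hcast, PySem.List.pyRange_one_succ_right (by omega), List.foldl_append, ih hu]
      simp only [List.foldl_cons, List.foldl_nil]
      rw [pascStep]
      have hlast : PySem.List.pyGetD ((List.range u).map pasc) (-1) [] = pasc (u - 1) := by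
        have hne : (List.range u).map pasc ≠ [] := by simp; omega
        rw [PySem.List.pyGetD_neg_one _ [] hne, List.getLast_eq_getElem]
        obtain ⟨v, hv⟩ : ∃ v, u = v + 1 := ⟨u - 1, by omega⟩
        subst hv
        simp
      rw [hlast]
      obtain ⟨v, hv⟩ : ∃ v, u = v + 1 := ⟨u - 1, by omega⟩
      subst hv
      have : (v + 1 : Nat) - 1 = v := by omega
      rw [this]
      rw [show ((v + 1 : Nat) : Int) = (((v + 1 : Nat)) : Int) from rfl, pasc_step_eq v]
      simp [List.range_succ]

-- Bell list fold invariant (C already equals the mapped pascal rows; t+1 ≤ m rows exist)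
theorem foldBell_inv (m : Nat) (t : Nat) (ht : t < m) :
    (PySem.List.pyRange 0 (t : Int) 1).foldl (bellNumStep ((List.range m).map pasc)) [1]
      = (List.range (t + 1)).map bN := by
  induction t with
  | zero => simp [bN, aT]
  | succ u ih =>
    have hu : u < m := by omega
    have hcast : (((u + 1 : Nat)) : Int) = ((u : Nat) : Int) + 1 := by push_cast; ring
    rw [hcast, PySem.List.pyRange_one_succ_right (by omega), List.foldl_append, ih hu]
    simp only [List.foldl_cons, List.foldl_nil]
    rw [bellNumStep]
    have hC : PySem.List.pyGetD ((List.range m).map pasc) ((u : Nat) : Int) [] = pasc u := by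
      rw [PySem.List.pyGetD_natCast, List.getD_eq_getElem _ _ (by simpa using hu)]
      simp
    have hsum : ((PySem.List.pyRange 0 (((u : Nat) : Int) + 1) 1).map
        (fun k => PySem.List.pyGetD (PySem.List.pyGetD ((List.range m).map pasc) ((u : Nat) : Int) []) k 0
                  * PySem.List.pyGetD ((List.range (u + 1)).map bN) k 0)).sum
        = bN (u + 1) := by
      rw [hC]
      have hr : ((u : Nat) : Int) + 1 = (((u + 1 : Nat)) : Int) := by push_cast; ring
      rw [hr, PySem.List.pyRange_zero_natCast, List.map_map]
      have hmap : ∀ k ∈ List.range (u + 1),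
          ((fun k : Int => PySem.List.pyGetD (pasc u) k 0
              * PySem.List.pyGetD ((List.range (u + 1)).map bN) k 0) ∘ (Nat.cast)) k
          = ((u.choose k : Nat) : Int) * bN k := by
        intro k hk
        simp only [List.mem_range] at hk
        simp only [Function.comp]
        rw [pasc_get u k (by omega)]
        rw [PySem.List.pyGetD_natCast, List.getD_eq_getElem _ _ (by simpa using hk)]
        simp
      rw [List.map_congr_left hmap, list_sum_range, ← bN_rec]
    rw [hsum]
    simp [List.range_succ]

-- the closed-form entry equals the triangle entry
theorem entry_eq (m r k : Nat) (hr : r < m) (hk : k ≤ r) :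
    ((PySem.List.pyRange 0 (((k : Nat) : Int) + 1) 1).map
      (fun j => PySem.List.pyGetD (PySem.List.pyGetD ((List.range m).map pasc) ((k : Nat) : Int) []) j 0
                * PySem.List.pyGetD ((List.range m).map bN) (((r : Nat) : Int) - j) 0)).sum
      = aT r k := by
  have hC : PySem.List.pyGetD ((List.range m).map pasc) ((k : Nat) : Int) [] = pasc k := by
    rw [PySem.List.pyGetD_natCast, List.getD_eq_getElem _ _ (by simpa using by omega : k < ((List.range m).map pasc).length)]
    simp
  rw [hC]
  have hr1 : ((k : Nat) : Int) + 1 = (((k + 1 : Nat)) : Int) := by push_cast; ring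
  rw [hr1, PySem.List.pyRange_zero_natCast, List.map_map]
  have hmap : ∀ j ∈ List.range (k + 1),
      ((fun j : Int => PySem.List.pyGetD (pasc k) j 0
          * PySem.List.pyGetD ((List.range m).map bN) (((r : Nat) : Int) - j) 0) ∘ (Nat.cast)) j
      = ((k.choose j : Nat) : Int) * bN (r - j) := by
    intro j hj
    simp only [List.mem_range] at hj
    simp only [Function.comp]
    rw [pasc_get k j (by omega)]
    have hcast : ((r : Nat) : Int) - ((j : Nat) : Int) = (((r - j : Nat)) : Int) := by
      have : j ≤ r := by omega
      omega
    rw [hcast, PySem.List.pyGetD_natCast,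
        List.getD_eq_getElem _ _ (by simpa using by omega : r - j < ((List.range m).map bN).length)]
    simp
  rw [List.map_congr_left hmap, list_sum_range, ← aT_eq_sum r k hk]

-- ===== VERDICT (by name: the statement is the Claim_ definition above) =====
theorem buildBell_spec : Claim_equal_buildBell := by
  intro row _
  unfold Spec_buildBell buildBell buildBell_alt
  by_cases hle : row ≤ 0
  · rw [PySem.List.pyRange_one_eq_nil hle, if_pos hle]
    rfl
  · rw [if_neg hle]
    have hpos : 0 < row := by omega
    obtain ⟨m, hm, hrow⟩ : ∃ m : Nat, 1 ≤ m ∧ row = (m : Int) := ⟨row.toNat, by omega, by omega⟩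
    subst hrow
    simp only []
    rw [foldA_inv m, foldC_inv m hm]
    have hrow1 : (m : Int) - 1 = (((m - 1 : Nat)) : Int) := by omega
    rw [hrow1, foldBell_inv m (m - 1) (by omega)]
    have hm1 : m - 1 + 1 = m := by omega
    rw [hm1]
    rw [PySem.List.pyRange_zero_natCast, List.map_map]
    apply List.map_congr_left
    intro r hrm
    simp only [List.mem_range] at hrm
    simp only [Function.comp]
    have hr1 : ((r : Nat) : Int) + 1 = (((r + 1 : Nat)) : Int) := by push_cast; ring
    rw [hr1, PySem.List.pyRange_zero_natCast, List.map_map]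
    unfold rowM
    apply List.map_congr_left
    intro k hkr
    simp only [List.mem_range] at hkr
    simp only [Function.comp]
    exact (entry_eq m r k hrm (by omega)).symm
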